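-- pv_equiv track=rewrite | github.com/lalalazxc1-coder/fot | backend/utils/security/url_guard.py | _is_hostname_allowed
-- ===== SOURCE A (Python) =====
-- from typing import Sequence
--
-- def _is_hostname_allowed(host: str, allowlist: Sequence[str]) -> bool:
--     for entry in allowlist:
--         if not entry:
--             continue
--         if entry.startswith("*."):
--             suffix = entry[1:]
--             if host.endswith(suffix):
--                 return True
--             continue
--         if entry.startswith("."):
--             if host.endswith(entry):
--                 return True
--             continue
--         if host == entry:
--             return True
--     return False
-- ===== SOURCE B (Python) =====
-- def _is_hostname_allowed(host, allowlist):
--     exact = set()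
--     suffixes = set()
--     for entry in allowlist:
--         if not entry:
--             continue
--         if entry.startswith("*."):
--             suffixes.add(entry[1:])
--         elif entry.startswith("."):
--             suffixes.add(entry)
--         else:
--             exact.add(entry)
--     if host in exact:
--         return True
--     host_suffixes = {host[i:] for i, c in enumerate(host) if c == "."}
--     return not suffixes.isdisjoint(host_suffixes)
-- ===== Notes on version B (the rewrite author's own statement) =====
-- stated objective: alternative
-- what changed: B makes one classification pass building an exact-match set and a dotted-suffix set, then answers by set membership of the host and of the host's own dot-position suffixes, instead of A's per-entry startswith/endswith scan with early return.
import Mathlib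
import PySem

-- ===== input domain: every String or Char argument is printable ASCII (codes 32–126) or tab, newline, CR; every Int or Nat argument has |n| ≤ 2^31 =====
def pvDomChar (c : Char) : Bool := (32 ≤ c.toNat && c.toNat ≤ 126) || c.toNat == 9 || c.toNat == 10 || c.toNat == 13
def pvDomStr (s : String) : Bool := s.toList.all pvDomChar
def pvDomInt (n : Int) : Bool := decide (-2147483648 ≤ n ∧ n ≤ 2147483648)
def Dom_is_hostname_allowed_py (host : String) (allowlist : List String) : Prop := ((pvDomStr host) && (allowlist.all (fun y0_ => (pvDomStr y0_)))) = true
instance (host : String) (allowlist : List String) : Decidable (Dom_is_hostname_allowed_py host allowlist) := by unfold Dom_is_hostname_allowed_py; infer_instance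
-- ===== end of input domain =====

-- B replaces A's per-entry endswith scan by precomputed exact/suffix sets plus a lookup of the
-- host's own dotted suffixes (objective: alternative decomposition; no speed claim).

-- ===== PORT A =====
-- literal port of A's for-loop (early return = recursion over the list)
def goA (host : String) : List String → Bool
  | [] => false
  | entry :: rest =>
    if entry = "" then goA host rest
    else if PySem.Str.startswith entry "*." then
      (if PySem.Str.endswith host (PySem.Str.slice entry (some 1) none) then true else goA host rest)
    else if PySem.Str.startswith entry "." then
      (if PySem.Str.endswith host entry then true else goA host rest)
    else if host = entry then true
    else goA host rest

def is_hostname_allowed_py (host : String) (allowlist : List String) : Bool :=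
  goA host allowlist

-- ===== PORT B =====
-- one step of B's classification loop: route each entry into (exact, suffixes)
def bstep (p : PySem.Set String × PySem.Set String) (entry : String) :
    PySem.Set String × PySem.Set String :=
  if entry = "" then p
  else if PySem.Str.startswith entry "*." then (p.1, PySem.Set.add p.2 (PySem.Str.slice entry (some 1) none))
  else if PySem.Str.startswith entry "." then (p.1, PySem.Set.add p.2 entry)
  else (PySem.Set.add p.1 entry, p.2)

-- the comprehension {host[i:] for i, c in enumerate(host) if c == "."} as a list (set via ofList)
def hostDotSuffixes (host : String) : List String :=
  (PySem.List.enumerate host.toList).filterMap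
    (fun ic => if ic.2 = '.' then some (PySem.Str.slice host (some ic.1) none) else none)

def is_hostname_allowed_py_alt (host : String) (allowlist : List String) : Bool :=
  let sets := allowlist.foldl bstep (PySem.Set.empty, PySem.Set.empty)
  if PySem.Set.contains sets.1 host then true
  else !(PySem.Set.isdisjoint sets.2 (PySem.Set.ofList (hostDotSuffixes host)))

-- ===== PRECONDITION & SPEC =====
def Spec_is_hostname_allowed_py (host : String) (allowlist : List String) (out : Bool) : Prop := out = is_hostname_allowed_py_alt host allowlist
instance (host : String) (allowlist : List String) (out : Bool) : Decidable (Spec_is_hostname_allowed_py host allowlist out) := by unfold Spec_is_hostname_allowed_py; infer_instance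

-- ===== CLAIM (what is proved, stated in full; the proofs are below) =====
def Claim_equal_is_hostname_allowed_py : Prop := ∀ (host : String) (allowlist : List String), Dom_is_hostname_allowed_py host allowlist → Spec_is_hostname_allowed_py host allowlist (is_hostname_allowed_py host allowlist)

-- ===== LEMMAS AND PROOFS =====

-- the per-entry test A performs, as one Bool
def entryMatch (host e : String) : Bool :=
  if e = "" then false
  else if PySem.Str.startswith e "*." then PySem.Str.endswith host (PySem.Str.slice e (some 1) none)
  else if PySem.Str.startswith e "." then PySem.Str.endswith host e
  else host == e

-- classification of an entry: the suffix it contributes, if any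
def suffOf (e : String) : Option String :=
  if e = "" then none
  else if PySem.Str.startswith e "*." then some (PySem.Str.slice e (some 1) none)
  else if PySem.Str.startswith e "." then some e
  else none

-- classification of an entry: the exact host it contributes, if any
def exactOf (e : String) : Option String :=
  if e = "" then none
  else if PySem.Str.startswith e "*." then none
  else if PySem.Str.startswith e "." then none
  else some e

lemma goA_eq_any (host : String) (l : List String) :
    goA host l = l.any (entryMatch host) := by
  induction l with
  | nil => rfl
  | cons e rest ih =>
    rw [List.any_cons, ← ih]
    simp only [goA, entryMatch]
    split_ifs <;> simp_all

lemma foldl_bstep_mem (l : List String) (p : PySem.Set String × PySem.Set String) (x : String) :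
    (x ∈ (List.foldl bstep p l).1 ↔ x ∈ p.1 ∨ x ∈ l.filterMap exactOf) ∧
    (x ∈ (List.foldl bstep p l).2 ↔ x ∈ p.2 ∨ x ∈ l.filterMap suffOf) := by
  induction l generalizing p with
  | nil => simp
  | cons e rest ih =>
    rw [List.foldl_cons]
    by_cases h1 : e = ""
    · have hb : bstep p e = p := by unfold bstep; rw [if_pos h1]
      have he : exactOf e = none := by unfold exactOf; rw [if_pos h1]
      have hs : suffOf e = none := by unfold suffOf; rw [if_pos h1]
      simp [hb, ih, he, hs]
    · by_cases h2 : PySem.Str.startswith e "*." = true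
      · have hb : bstep p e = (p.1, PySem.Set.add p.2 (PySem.Str.slice e (some 1) none)) := by
          unfold bstep; rw [if_neg h1, if_pos h2]
        have he : exactOf e = none := by unfold exactOf; rw [if_neg h1, if_pos h2]
        have hs : suffOf e = some (PySem.Str.slice e (some 1) none) := by
          unfold suffOf; rw [if_neg h1, if_pos h2]
        rw [hb]
        refine ⟨?_, ?_⟩
        · rw [(ih _).1]; simp [he]
        · rw [(ih _).2]
          simp only [List.filterMap_cons, hs, PySem.Set.mem_add, List.mem_cons]
          tauto
      · by_cases h3 : PySem.Str.startswith e "." = true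
        · have hb : bstep p e = (p.1, PySem.Set.add p.2 e) := by
            unfold bstep; rw [if_neg h1, if_neg h2, if_pos h3]
          have he : exactOf e = none := by unfold exactOf; rw [if_neg h1, if_neg h2, if_pos h3]
          have hs : suffOf e = some e := by unfold suffOf; rw [if_neg h1, if_neg h2, if_pos h3]
          rw [hb]
          refine ⟨?_, ?_⟩
          · rw [(ih _).1]; simp [he]
          · rw [(ih _).2]
            simp only [List.filterMap_cons, hs, PySem.Set.mem_add, List.mem_cons]
            tauto
        · have hb : bstep p e = (PySem.Set.add p.1 e, p.2) := by
            unfold bstep; rw [if_neg h1, if_neg h2, if_neg h3]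
          have he : exactOf e = some e := by unfold exactOf; rw [if_neg h1, if_neg h2, if_neg h3]
          have hs : suffOf e = none := by unfold suffOf; rw [if_neg h1, if_neg h2, if_neg h3]
          rw [hb]
          refine ⟨?_, ?_⟩
          · rw [(ih _).1]
            simp only [List.filterMap_cons, he, PySem.Set.mem_add, List.mem_cons]
            tauto
          · rw [(ih _).2]; simp [hs]

lemma mem_enumerate' {α : Type} (l : List α) (k : Int) (q : Int × α) :
    q ∈ PySem.List.enumerate l k ↔ ∃ j : Nat, l[j]? = some q.2 ∧ q.1 = k + j := by
  induction l generalizing k with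
  | nil => simp [PySem.List.enumerate]
  | cons a t ih =>
    simp only [PySem.List.enumerate_cons, List.mem_cons, ih]
    constructor
    · rintro (rfl | ⟨j, hj, hq⟩)
      · exact ⟨0, by simp⟩
      · exact ⟨j + 1, by simpa using hj, by omega⟩
    · rintro ⟨j, hj, hq⟩
      cases j with
      | zero =>
        left
        simp only [List.getElem?_cons_zero, Option.some.injEq] at hj
        obtain ⟨q1, q2⟩ := q
        simp_all
      | succ n =>
        right
        exact ⟨n, by simpa using hj, by omega⟩

lemma mem_hostDotSuffixes (host x : String) :
    x ∈ hostDotSuffixes host ↔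
      ∃ n : Nat, host.toList[n]? = some '.' ∧ x.toList = host.toList.drop n := by
  unfold hostDotSuffixes
  simp only [List.mem_filterMap]
  constructor
  · rintro ⟨ic, hmem, hif⟩
    rw [mem_enumerate'] at hmem
    obtain ⟨j, hj, hic1⟩ := hmem
    by_cases hdot : ic.2 = '.'
    · rw [if_pos hdot] at hif
      obtain rfl := Option.some.inj hif
      refine ⟨j, by rw [hdot] at hj; exact hj, ?_⟩
      have hji : ic.1 = (j : Int) := by omega
      simp [hji, PySem.Str.toList_slice, PySem.List.slice_from _ (by omega : (0:Int) ≤ (j:Int))]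
    · rw [if_neg hdot] at hif
      exact absurd hif (by simp)
  · rintro ⟨n, hn, hx⟩
    refine ⟨((n : Int), '.'), ?_, ?_⟩
    · rw [mem_enumerate']
      exact ⟨n, hn, by omega⟩
    · have hxx : PySem.Str.slice host (some (n : Int)) none = x := by
        apply String.ext
        simp [PySem.Str.toList_slice, PySem.List.slice_from _ (by omega : (0:Int) ≤ (n:Int)), hx]
      simp [hxx]

lemma suffOf_head (e s : String) (h : suffOf e = some s) : ∃ t, s.toList = '.' :: t := by
  unfold suffOf at h
  split_ifs at h with h1 h2 h3
  · -- "*." entries: e = '*' :: '.' :: r, the stored suffix is e[1:]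
    obtain rfl := Option.some.inj h
    have hp : "*.".toList <+: e.toList := by
      simpa [PySem.Chars.startswith_iff] using h2
    obtain ⟨r, hr⟩ := hp
    have he : e.toList = '*' :: '.' :: r := by simpa using hr.symm
    refine ⟨r, ?_⟩
    simp [PySem.Str.toList_slice, PySem.List.slice_from _ (by omega : (0:Int) ≤ 1), he]
  · -- "." entries are stored as they are
    obtain rfl := Option.some.inj h
    have hp : ".".toList <+: e.toList := by
      simpa [PySem.Chars.startswith_iff] using h3
    obtain ⟨r, hr⟩ := hp
    exact ⟨r, by simpa using hr.symm⟩

lemma endswith_iff_mem_hds (host s : String) (hd : ∃ t, s.toList = '.' :: t) :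
    PySem.Str.endswith host s = true ↔ s ∈ hostDotSuffixes host := by
  obtain ⟨t, ht⟩ := hd
  rw [mem_hostDotSuffixes]
  simp only [PySem.Str.endswith_eq, PySem.Chars.endswith_iff]
  constructor
  · rintro ⟨pre, hpre⟩
    refine ⟨pre.length, ?_, ?_⟩
    · rw [← hpre, ht, List.getElem?_append_right (le_refl _)]
      simp
    · rw [← hpre, List.drop_left]
  · rintro ⟨n, hn, hx⟩
    rw [hx]
    exact List.drop_suffix n host.toList

lemma any_entryMatch_iff (host : String) (l : List String) :
    l.any (entryMatch host) = true ↔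
      host ∈ l.filterMap exactOf ∨
        ∃ s ∈ l.filterMap suffOf, PySem.Str.endswith host s = true := by
  induction l with
  | nil => simp
  | cons e rest ih =>
    rw [List.any_cons, Bool.or_eq_true, ih]
    by_cases h1 : e = ""
    · have hm : entryMatch host e = false := by unfold entryMatch; rw [if_pos h1]
      have he : exactOf e = none := by unfold exactOf; rw [if_pos h1]
      have hs : suffOf e = none := by unfold suffOf; rw [if_pos h1]
      simp [hm, he, hs]
    · by_cases h2 : PySem.Str.startswith e "*." = true
      · have hm : entryMatch host e = PySem.Str.endswith host (PySem.Str.slice e (some 1) none) := by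
          unfold entryMatch; rw [if_neg h1, if_pos h2]
        have he : exactOf e = none := by unfold exactOf; rw [if_neg h1, if_pos h2]
        have hs : suffOf e = some (PySem.Str.slice e (some 1) none) := by
          unfold suffOf; rw [if_neg h1, if_pos h2]
        rw [hm]
        simp only [List.filterMap_cons, he, hs]
        constructor
        · rintro (hend | h)
          · exact Or.inr ⟨_, List.mem_cons_self, hend⟩
          · rcases h with hex | ⟨s, hsm, hend⟩
            · exact Or.inl hex
            · exact Or.inr ⟨s, List.mem_cons_of_mem _ hsm, hend⟩
        · rintro (hex | ⟨s, hsm, hend⟩)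
          · exact Or.inr (Or.inl hex)
          · rcases List.mem_cons.mp hsm with rfl | hsm'
            · exact Or.inl hend
            · exact Or.inr (Or.inr ⟨s, hsm', hend⟩)
      · by_cases h3 : PySem.Str.startswith e "." = true
        · have hm : entryMatch host e = PySem.Str.endswith host e := by
            unfold entryMatch; rw [if_neg h1, if_neg h2, if_pos h3]
          have he : exactOf e = none := by unfold exactOf; rw [if_neg h1, if_neg h2, if_pos h3]
          have hs : suffOf e = some e := by unfold suffOf; rw [if_neg h1, if_neg h2, if_pos h3]
          rw [hm]
          simp only [List.filterMap_cons, he, hs]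
          constructor
          · rintro (hend | h)
            · exact Or.inr ⟨_, List.mem_cons_self, hend⟩
            · rcases h with hex | ⟨s, hsm, hend⟩
              · exact Or.inl hex
              · exact Or.inr ⟨s, List.mem_cons_of_mem _ hsm, hend⟩
          · rintro (hex | ⟨s, hsm, hend⟩)
            · exact Or.inr (Or.inl hex)
            · rcases List.mem_cons.mp hsm with rfl | hsm'
              · exact Or.inl hend
              · exact Or.inr (Or.inr ⟨s, hsm', hend⟩)
        · have hm : entryMatch host e = (host == e) := by
            unfold entryMatch; rw [if_neg h1, if_neg h2, if_neg h3]
          have he : exactOf e = some e := by unfold exactOf; rw [if_neg h1, if_neg h2, if_neg h3]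
          have hs : suffOf e = none := by unfold suffOf; rw [if_neg h1, if_neg h2, if_neg h3]
          rw [hm]
          simp only [List.filterMap_cons, he, hs, List.mem_cons, beq_iff_eq]
          tauto

lemma alt_iff (host : String) (l : List String) :
    is_hostname_allowed_py_alt host l = true ↔
      host ∈ l.filterMap exactOf ∨ ∃ s ∈ l.filterMap suffOf, s ∈ hostDotSuffixes host := by
  unfold is_hostname_allowed_py_alt
  have hempty : ∀ y : String, y ∉ (PySem.Set.empty : PySem.Set String) := by
    intro y hy
    simp [PySem.Set.empty] at hy
  by_cases hc : PySem.Set.contains (List.foldl bstep (PySem.Set.empty, PySem.Set.empty) l).1 host = true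
  · rw [if_pos hc]
    simp only [true_iff]
    exact Or.inl
      ((((foldl_bstep_mem l _ host).1).mp ((PySem.Set.contains_iff _ _).mp hc)).resolve_left
        (hempty host))
  · rw [if_neg hc]
    have hiff :
        ((List.foldl bstep (PySem.Set.empty, PySem.Set.empty) l).2.isdisjoint
            (PySem.Set.ofList (hostDotSuffixes host)) = false) ↔
          ∃ s ∈ l.filterMap suffOf, s ∈ hostDotSuffixes host := by
      rw [← Bool.not_eq_true, PySem.Set.isdisjoint_iff]
      push Not
      constructor
      · rintro ⟨s, hs, hmem2⟩
        exact ⟨s, (((foldl_bstep_mem l _ s).2).mp hs).resolve_left (hempty s),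
          (PySem.Set.mem_ofList _ _).mp hmem2⟩
      · rintro ⟨s, hs, hm⟩
        exact ⟨s, ((foldl_bstep_mem l _ s).2).mpr (Or.inr hs), (PySem.Set.mem_ofList _ _).mpr hm⟩
    rw [Bool.not_eq_true', hiff]
    constructor
    · exact Or.inr
    · rintro (hex | h)
      · exact absurd ((PySem.Set.contains_iff _ _).mpr (((foldl_bstep_mem l _ host).1).mpr (Or.inr hex))) hc
      · exact h

-- ===== VERDICT (by name: the statement is the Claim_ definition above) =====
theorem is_hostname_allowed_py_spec : Claim_equal_is_hostname_allowed_py := by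
  intro host allowlist _
  unfold Spec_is_hostname_allowed_py
  rw [Bool.eq_iff_iff]
  rw [is_hostname_allowed_py, goA_eq_any, any_entryMatch_iff, alt_iff]
  apply or_congr Iff.rfl
  constructor
  · rintro ⟨s, hs, hend⟩
    obtain ⟨e, _, hse⟩ := List.mem_filterMap.mp hs
    exact ⟨s, hs, (endswith_iff_mem_hds host s (suffOf_head e s hse)).mp hend⟩
  · rintro ⟨s, hs, hm⟩
    obtain ⟨e, _, hse⟩ := List.mem_filterMap.mp hs
    exact ⟨s, hs, (endswith_iff_mem_hds host s (suffOf_head e s hse)).mpr hm⟩
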